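-- pv_equiv track=rewrite | github.com/serbaniaotic/zen-mcp-server | tools/persistent_memory.py | _generate_window_recommendations
-- ===== SOURCE A (Python) =====
-- from typing import Any, Dict, Optional, List
--
-- def _generate_window_recommendations(executions: List[Dict[str, Any]], window_id: str) -> Dict[str, List[str]]:
--     """Generate window-specific recommendations"""
--     recommendations = {}
--
--     # Group executions by platform/window
--     window_executions = {}
--     for exec in executions:
--         platform = exec.get('platform', 'unknown')
--         if platform not in window_executions:
--             window_executions[platform] = []
--         window_executions[platform].append(exec)
--
--     for platform, execs in window_executions.items():
--         platform_recommendations = []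
--
--         for exec in execs:
--             todo_id = exec.get('todo_id')
--             progress = exec.get('progress_percent', 0)
--             status = exec.get('status')
--
--             if status == 'executing':
--                 platform_recommendations.append(f"Continue {todo_id}: /todo-continue --todo-id={todo_id}")
--             elif status == 'paused':
--                 platform_recommendations.append(f"Resume {todo_id}: /todo-continue --todo-id={todo_id}")
--
--         platform_recommendations.append(f"Start new todo: /todo-start --todo-id=new_feature")
--         platform_recommendations.append(f"Sync with other windows: /multi-window-todos --sync-all")
--
--         recommendations[platform] = platform_recommendations
--
--     return recommendations
-- ===== SOURCE B (Python) =====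
-- def _generate_window_recommendations(executions, window_id):
--     """Generate window-specific recommendations (single pass, no intermediate grouping dict)"""
--     per_platform = {}
--     for execution in executions:
--         platform = execution.get('platform', 'unknown')
--         msgs = per_platform.setdefault(platform, [])
--         status = execution.get('status')
--         todo_id = execution.get('todo_id')
--         if status == 'executing':
--             msgs.append(f"Continue {todo_id}: /todo-continue --todo-id={todo_id}")
--         elif status == 'paused':
--             msgs.append(f"Resume {todo_id}: /todo-continue --todo-id={todo_id}")
--     return {platform: msgs + ["Start new todo: /todo-start --todo-id=new_feature",
--                               "Sync with other windows: /multi-window-todos --sync-all"]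
--             for platform, msgs in per_platform.items()}
-- ===== Notes on version B (the rewrite author's own statement) =====
-- stated objective: simpler
-- what changed: B drops A's intermediate group-by-platform dict of execution lists: it builds each platform's recommendation list directly in one pass over executions and appends the two static lines in a final dict comprehension.
import Mathlib
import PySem

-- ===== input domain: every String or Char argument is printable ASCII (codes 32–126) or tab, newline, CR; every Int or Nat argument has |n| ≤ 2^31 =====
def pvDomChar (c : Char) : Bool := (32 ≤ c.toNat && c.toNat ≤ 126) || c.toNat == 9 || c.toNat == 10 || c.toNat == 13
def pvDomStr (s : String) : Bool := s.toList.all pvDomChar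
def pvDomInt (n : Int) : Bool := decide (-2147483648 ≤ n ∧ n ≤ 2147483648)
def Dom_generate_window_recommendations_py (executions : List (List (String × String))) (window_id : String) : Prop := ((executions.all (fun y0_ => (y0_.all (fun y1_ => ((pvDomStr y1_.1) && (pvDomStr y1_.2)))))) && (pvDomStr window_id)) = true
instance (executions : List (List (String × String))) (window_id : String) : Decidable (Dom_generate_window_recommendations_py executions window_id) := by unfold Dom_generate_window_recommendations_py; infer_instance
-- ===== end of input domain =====

-- B replaces A's two-phase "group executions by platform, then walk the groups" with a single pass
-- that builds each platform's recommendation list directly (objective: simpler).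

-- ===== PORT A =====
-- shared f-string helpers (exact: dict values are strings; str(None) prints "None")
def pvOptStr (t : Option String) : String := t.getD "None"
def pvContMsg (t : Option String) : String :=
  "Continue " ++ pvOptStr t ++ ": /todo-continue --todo-id=" ++ pvOptStr t
def pvResMsg (t : Option String) : String :=
  "Resume " ++ pvOptStr t ++ ": /todo-continue --todo-id=" ++ pvOptStr t
def pvStartMsg : String := "Start new todo: /todo-start --todo-id=new_feature"
def pvSyncMsg : String := "Sync with other windows: /multi-window-todos --sync-all"
-- exec.get('platform', 'unknown')
def pvPlat (e : List (String × String)) : String := (PySem.Dict.mk e).getD "platform" "unknown"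

-- body of A's grouping loop: if platform not in window_executions: …[platform] = []; …[platform].append(exec)
def pvAGroupStep (d : PySem.Dict String (List (List (String × String))))
    (e : List (String × String)) : PySem.Dict String (List (List (String × String))) :=
  let platform := pvPlat e
  let d := if d.contains platform then d else d.insert platform []
  d.insert platform (d.getD platform [] ++ [e])

-- body of A's inner loop over one platform's executions
def pvAInnerStep (acc : List String) (e : List (String × String)) : List String :=
  let todo_id := (PySem.Dict.mk e).get? "todo_id"
  let status := (PySem.Dict.mk e).get? "status"
  if status == some "executing" then acc ++ [pvContMsg todo_id]
  else if status == some "paused" then acc ++ [pvResMsg todo_id]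
  else acc

-- body of A's loop over window_executions.items()
def pvARecStep (r : PySem.Dict String (List String))
    (pe : String × List (List (String × String))) : PySem.Dict String (List String) :=
  let platform_recommendations := pe.2.foldl pvAInnerStep []
  r.insert pe.1 (platform_recommendations ++ [pvStartMsg, pvSyncMsg])

def generate_window_recommendations_py (executions : List (List (String × String))) (window_id : String) : List (String × List String) :=
  let window_executions := executions.foldl pvAGroupStep PySem.Dict.empty
  let recommendations := window_executions.items.foldl pvARecStep PySem.Dict.empty
  recommendations.items

-- ===== PORT B =====
-- body of B's single loop: register the platform, then append its message (if any) directly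
def pvBStep (r : PySem.Dict String (List String))
    (e : List (String × String)) : PySem.Dict String (List String) :=
  let platform := pvPlat e
  let r := r.setdefault platform []
  let status := (PySem.Dict.mk e).get? "status"
  let todo_id := (PySem.Dict.mk e).get? "todo_id"
  if status == some "executing" then r.insert platform (r.getD platform [] ++ [pvContMsg todo_id])
  else if status == some "paused" then r.insert platform (r.getD platform [] ++ [pvResMsg todo_id])
  else r

def generate_window_recommendations_py_alt (executions : List (List (String × String))) (window_id : String) : List (String × List String) :=
  let per_platform := executions.foldl pvBStep PySem.Dict.empty
  -- B's final dict comprehension: its keys are the (distinct) keys of per_platform, so its items are exactly this map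
  per_platform.items.map (fun pm => (pm.1, pm.2 ++ [pvStartMsg, pvSyncMsg]))

-- ===== PRECONDITION & SPEC =====
def Spec_generate_window_recommendations_py (executions : List (List (String × String))) (window_id : String) (out : List (String × List String)) : Prop := out = generate_window_recommendations_py_alt executions window_id
instance (executions : List (List (String × String))) (window_id : String) (out : List (String × List String)) : Decidable (Spec_generate_window_recommendations_py executions window_id out) := by unfold Spec_generate_window_recommendations_py; infer_instance

-- ===== CLAIM (what is proved, stated in full; the proofs are below) =====
def Claim_equal_generate_window_recommendations_py : Prop := ∀ (executions : List (List (String × String))) (window_id : String), Dom_generate_window_recommendations_py executions window_id → Spec_generate_window_recommendations_py executions window_id (generate_window_recommendations_py executions window_id)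

-- ===== LEMMAS AND PROOFS =====

-- the message(s) one execution contributes (0 or 1 strings)
def pvMsgOf (e : List (String × String)) : List String :=
  if (PySem.Dict.mk e).get? "status" == some "executing" then [pvContMsg ((PySem.Dict.mk e).get? "todo_id")]
  else if (PySem.Dict.mk e).get? "status" == some "paused" then [pvResMsg ((PySem.Dict.mk e).get? "todo_id")]
  else []

lemma pvAInnerStep_eq (acc : List String) (e : List (String × String)) :
    pvAInnerStep acc e = acc ++ pvMsgOf e := by
  unfold pvAInnerStep pvMsgOf
  split_ifs <;> simp_all

lemma pvAInner_eq (l : List (List (String × String))) : ∀ acc,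
    l.foldl pvAInnerStep acc = acc ++ l.flatMap pvMsgOf := by
  induction l with
  | nil => simp
  | cons e t ih =>
    intro acc
    rw [List.foldl_cons, pvAInnerStep_eq, ih, List.flatMap_cons, List.append_assoc]

lemma pvAGroupStep_keys (d : PySem.Dict String (List (List (String × String)))) (e : List (String × String)) :
    (pvAGroupStep d e).keys = if d.contains (pvPlat e) then d.keys else d.keys ++ [pvPlat e] := by
  unfold pvAGroupStep
  by_cases h : d.contains (pvPlat e)
  · simp only [h, if_true]
    exact PySem.Dict.keys_insert_of_contains d _ h
  · simp only [h, Bool.false_eq_true, if_false]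
    rw [PySem.Dict.keys_insert_of_contains _ _ (PySem.Dict.contains_insert_self d _ _),
        PySem.Dict.keys_insert_of_not_contains d _ (by simpa using h)]

lemma pvAGroupStep_getD (d : PySem.Dict String (List (List (String × String)))) (e : List (String × String)) (q : String) :
    (pvAGroupStep d e).getD q [] = if q = pvPlat e then d.getD (pvPlat e) [] ++ [e] else d.getD q [] := by
  unfold pvAGroupStep
  by_cases h : d.contains (pvPlat e)
  · simp only [h, if_true, PySem.Dict.getD_insert]
  · simp only [h, Bool.false_eq_true, if_false, PySem.Dict.getD_insert]
    rw [PySem.Dict.getD_of_not_contains d _ (by simpa using h)]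
    split_ifs <;> simp

lemma pvBStep_keys (r : PySem.Dict String (List String)) (e : List (String × String)) :
    (pvBStep r e).keys = if r.contains (pvPlat e) then r.keys else r.keys ++ [pvPlat e] := by
  unfold pvBStep
  by_cases h : r.contains (pvPlat e)
  · simp only [h, if_true, PySem.Dict.setdefault_of_contains r _ h]
    split_ifs <;> first
      | rfl
      | exact PySem.Dict.keys_insert_of_contains r _ h
  · simp only [h, Bool.false_eq_true, if_false, PySem.Dict.setdefault_of_not_contains r _ (by simpa using h)]
    have hk := PySem.Dict.keys_insert_of_not_contains r ([] : List String) (by simpa using h)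
    split_ifs <;> first
      | exact hk
      | (rw [PySem.Dict.keys_insert_of_contains _ _ (PySem.Dict.contains_insert_self r _ _)]; exact hk)

lemma pvBStep_getD (r : PySem.Dict String (List String)) (e : List (String × String)) (q : String) :
    (pvBStep r e).getD q [] = if q = pvPlat e then r.getD (pvPlat e) [] ++ pvMsgOf e else r.getD q [] := by
  unfold pvBStep pvMsgOf
  dsimp only
  by_cases h : r.contains (pvPlat e)
  · rw [PySem.Dict.setdefault_of_contains r _ h]
    split_ifs <;> simp_all [PySem.Dict.getD_insert]
  · rw [PySem.Dict.setdefault_of_not_contains r _ (by simpa using h)]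
    have h0 : r.getD (pvPlat e) ([] : List String) = [] :=
      PySem.Dict.getD_of_not_contains r _ (by simpa using h)
    split_ifs <;> simp_all [PySem.Dict.getD_insert]

-- the two folds stay in lock-step: same keys (in order), keys without duplicates,
-- and B's value at each key is the messages of A's group at that key
lemma pvLockStep : ∀ (l : List (List (String × String)))
    (d1 : PySem.Dict String (List (List (String × String)))) (d2 : PySem.Dict String (List String)),
    d1.keys = d2.keys → d1.keys.Nodup →
    (∀ p, (d1.getD p []).flatMap pvMsgOf = d2.getD p []) →
    (l.foldl pvAGroupStep d1).keys = (l.foldl pvBStep d2).keys ∧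
    (l.foldl pvAGroupStep d1).keys.Nodup ∧
    (∀ p, ((l.foldl pvAGroupStep d1).getD p []).flatMap pvMsgOf = (l.foldl pvBStep d2).getD p []) := by
  intro l
  induction l with
  | nil => intro d1 d2 hk hnd hv; exact ⟨hk, hnd, hv⟩
  | cons e t ih =>
    intro d1 d2 hk hnd hv
    simp only [List.foldl_cons]
    have hc : d1.contains (pvPlat e) = d2.contains (pvPlat e) := by
      rw [PySem.Dict.contains_eq_decide_mem_keys, PySem.Dict.contains_eq_decide_mem_keys, hk]
    apply ih
    · rw [pvAGroupStep_keys, pvBStep_keys, hc, hk]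
    · rw [pvAGroupStep_keys]
      by_cases h : d1.contains (pvPlat e)
      · simpa [h] using hnd
      · have hmem : pvPlat e ∉ d1.keys := by
          rw [PySem.Dict.contains_eq_decide_mem_keys] at h
          simpa using h
        simp [h, List.nodup_append, hnd]
        intro a ha hEq
        exact hmem (hEq ▸ ha)
    · intro p
      rw [pvAGroupStep_getD, pvBStep_getD]
      by_cases hp : p = pvPlat e
      · simp [hp, hv (pvPlat e)]
      · simp [hp, hv p]

-- ===== VERDICT (by name: the statement is the Claim_ definition above) =====
theorem generate_window_recommendations_py_spec : Claim_equal_generate_window_recommendations_py := by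
  intro executions window_id _
  show generate_window_recommendations_py executions window_id
      = generate_window_recommendations_py_alt executions window_id
  simp only [generate_window_recommendations_py, generate_window_recommendations_py_alt]
  obtain ⟨hk, hnd, hv⟩ := pvLockStep executions PySem.Dict.empty PySem.Dict.empty
    (by simp [PySem.Dict.keys_empty]) (by simp [PySem.Dict.keys_empty])
    (by intro p; simp [PySem.Dict.getD_empty])
  set we := executions.foldl pvAGroupStep PySem.Dict.empty with hwe
  set recs := executions.foldl pvBStep PySem.Dict.empty with hrecs
  have hndB : recs.keys.Nodup := hk ▸ hnd
  -- A's second loop inserts fresh, distinct keys into an empty dict: its items are a map over we.items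
  have hfold : (we.items.foldl pvARecStep PySem.Dict.empty).items
      = we.items.map (fun pe => (pe.1, pe.2.foldl pvAInnerStep [] ++ [pvStartMsg, pvSyncMsg])) := by
    have h := PySem.Dict.items_foldl_insert_fresh we.items (fun pe => pe.1)
      (fun pe => pe.2.foldl pvAInnerStep [] ++ [pvStartMsg, pvSyncMsg]) PySem.Dict.empty
      (by intro a _; simp [PySem.Dict.contains_empty])
      (by simpa [PySem.Dict.keys] using hnd)
    have hemp : (PySem.Dict.empty : PySem.Dict String (List String)).items = [] := rfl
    simpa [pvARecStep, hemp] using h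
  rw [hfold]
  rw [PySem.Dict.items_eq_map_keys we hnd [], PySem.Dict.items_eq_map_keys recs hndB []]
  simp only [List.map_map]
  rw [← hk]
  apply List.map_congr_left
  intro k _
  simp only [Function.comp_apply]
  simp only [pvAInner_eq, List.nil_append, hv k]
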